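-- pv_equiv track=rewrite | github.com/jonathanwxh-cell/alyosha-workspace | scripts/should-surface.py | get_surfaces_without_engagement
-- ===== SOURCE A (Python) =====
-- def get_surfaces_without_engagement(feedback_log):
--     """Count consecutive surfaces without reply OR reaction"""
--     count = 0
--     for entry in reversed(feedback_log):
--         if entry.get("type") == "surface":
--             count += 1
--         elif entry.get("type") in ["reply", "reaction"]:
--             # Any engagement signal breaks the streak
--             break
--     return count
-- ===== SOURCE B (Python) =====
-- def get_surfaces_without_engagement(feedback_log):
--     """Count consecutive surfaces without reply OR reaction.
--
--     Staged pipeline: project the types, find the index of the first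
--     engagement signal in newest-to-oldest order, then count 'surface'
--     in the slice before it."""
--     types = [e.get("type") for e in reversed(feedback_log)]
--     n = next((i for i, t in enumerate(types) if t in ("reply", "reaction")), len(types))
--     return types[:n].count("surface")
-- ===== Notes on version B (the rewrite author's own statement) =====
-- stated objective: alternative
-- what changed: Replaces A's single accumulator loop with an early break by a staged pipeline: project entry types, locate the first engagement index in newest-first order, slice, and count 'surface' occurrences.
import Mathlib
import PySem

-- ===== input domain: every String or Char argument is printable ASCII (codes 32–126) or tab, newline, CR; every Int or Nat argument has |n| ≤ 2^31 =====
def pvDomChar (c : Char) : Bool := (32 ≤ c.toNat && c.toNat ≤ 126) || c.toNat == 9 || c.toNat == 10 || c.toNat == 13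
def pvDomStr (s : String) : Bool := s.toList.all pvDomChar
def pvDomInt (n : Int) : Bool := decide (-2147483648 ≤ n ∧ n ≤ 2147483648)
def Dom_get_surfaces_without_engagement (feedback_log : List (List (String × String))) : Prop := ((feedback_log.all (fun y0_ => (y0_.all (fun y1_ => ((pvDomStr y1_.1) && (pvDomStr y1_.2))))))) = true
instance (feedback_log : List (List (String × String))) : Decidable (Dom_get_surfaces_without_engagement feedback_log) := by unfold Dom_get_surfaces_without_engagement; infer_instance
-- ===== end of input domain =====

-- B replaces A's accumulator loop with an early break by a staged pipeline (map types, find first engagement index, slice, count): an alternative decomposition, same cost.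

-- ===== PORT A =====
-- loop over reversed(feedback_log) with accumulator `count`; engagement breaks (returns count)
def pvLoopA (count : Int) : List (List (String × String)) → Int
  | [] => count
  | entry :: rest =>
    if PySem.Dict.get? (PySem.Dict.mk entry) "type" == some "surface" then
      pvLoopA (count + 1) rest
    else if PySem.Dict.get? (PySem.Dict.mk entry) "type" == some "reply"
         || PySem.Dict.get? (PySem.Dict.mk entry) "type" == some "reaction" then
      count
    else
      pvLoopA count rest

def get_surfaces_without_engagement (feedback_log : List (List (String × String))) : Int :=
  pvLoopA 0 feedback_log.reverse

-- ===== PORT B =====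
-- types = [e.get("type") for e in reversed(feedback_log)]
def pvTypes (feedback_log : List (List (String × String))) : List (Option String) :=
  feedback_log.reverse.map (fun e => PySem.Dict.get? (PySem.Dict.mk e) "type")

-- t in ("reply", "reaction")
def pvIsEng (t : Option String) : Bool := t == some "reply" || t == some "reaction"

-- n = next((i for i,t in enumerate(types) if t in ("reply","reaction")), len(types));
-- returned as List.findIdx (first index satisfying the test, length if none — exactly Python's next-with-default).
-- types[:n] with 0 ≤ n ≤ len(types) is List.take n (exact on that range); .count via PySem.List.count.
def get_surfaces_without_engagement_alt (feedback_log : List (List (String × String))) : Int :=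
  let types := pvTypes feedback_log
  let n := types.findIdx pvIsEng
  (PySem.List.count (types.take n) (some "surface") : Int)

-- ===== PRECONDITION & SPEC =====
def Spec_get_surfaces_without_engagement (feedback_log : List (List (String × String))) (out : Int) : Prop := out = get_surfaces_without_engagement_alt feedback_log
instance (feedback_log : List (List (String × String))) (out : Int) : Decidable (Spec_get_surfaces_without_engagement feedback_log out) := by unfold Spec_get_surfaces_without_engagement; infer_instance

-- ===== CLAIM (what is proved, stated in full; the proofs are below) =====
def Claim_equal_get_surfaces_without_engagement : Prop := ∀ (feedback_log : List (List (String × String))), Dom_get_surfaces_without_engagement feedback_log → Spec_get_surfaces_without_engagement feedback_log (get_surfaces_without_engagement feedback_log)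

-- ===== LEMMAS AND PROOFS =====

-- A's loop accumulator is additive
theorem pvLoopA_add (c : Int) (xs : List (List (String × String))) :
    pvLoopA c xs = c + pvLoopA 0 xs := by
  induction xs generalizing c with
  | nil => simp [pvLoopA]
  | cons e rest ih =>
    simp only [pvLoopA]
    split_ifs with h1 h2
    · rw [ih (c + 1), ih (0 + 1)]; ring
    · ring
    · exact ih c

-- A's loop on any list equals B's pipeline on the mapped types of that list
theorem pvMain (xs : List (List (String × String))) :
    pvLoopA 0 xs =
      (PySem.List.count
        ((xs.map (fun e => PySem.Dict.get? (PySem.Dict.mk e) "type")).take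
          ((xs.map (fun e => PySem.Dict.get? (PySem.Dict.mk e) "type")).findIdx pvIsEng))
        (some "surface") : Int) := by
  induction xs with
  | nil => simp [pvLoopA, PySem.List.count]
  | cons e rest ih =>
    simp only [pvLoopA, List.map_cons, List.findIdx_cons]
    by_cases h1 : PySem.Dict.get? (PySem.Dict.mk e) "type" == some "surface"
    · have heng : pvIsEng (PySem.Dict.get? (PySem.Dict.mk e) "type") = false := by
        simp only [beq_iff_eq] at h1
        simp [pvIsEng, h1]
      rw [if_pos h1, pvLoopA_add, ih]
      simp only [beq_iff_eq] at h1
      simp [PySem.List.count_eq, h1, pvIsEng, List.findIdx_map]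
      ring
    · rw [if_neg h1]
      by_cases h2 : pvIsEng (PySem.Dict.get? (PySem.Dict.mk e) "type")
      · rw [if_pos (by simpa [pvIsEng] using h2)]
        simp [h2, PySem.List.count]
      · rw [if_neg (by simpa [pvIsEng] using h2)]
        rw [ih]
        simp only [Bool.not_eq_true] at h2
        simp [PySem.List.count_eq, h2, List.findIdx_map, List.count_cons, h1]

-- ===== VERDICT (by name: the statement is the Claim_ definition above) =====
theorem get_surfaces_without_engagement_spec : Claim_equal_get_surfaces_without_engagement := by
  intro l _
  unfold Spec_get_surfaces_without_engagement get_surfaces_without_engagement get_surfaces_without_engagement_alt pvTypes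
  exact pvMain l.reverse
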